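-- pv_equiv track=rewrite | github.com/StudentUniversiteta/FLT | prac4/v1.py | is_comp
-- ===== SOURCE A (Python) =====
-- def is_comp(a, b):
--     temp = ""
--     if a == "":
--         return b
--     for i in range(len(b)):
--         for j in range(len(a)):
--             if b[i] == a[j]:
--                 break
--             if j == len(a) - 1:
--                 temp += b[i]
--     return temp
-- ===== SOURCE B (Python) =====
-- def is_comp(a, b):
--     if a == "":
--         return b
--     table = str.maketrans("", "", a)
--     return b.translate(table)
-- ===== Notes on version B (the rewrite author's own statement) =====
-- stated objective: faster
-- what changed: Replaces the nested index loops (scan all of a for each character of b) with a deletion table built once from a (str.maketrans) and a single translate pass over b.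
import Mathlib
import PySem

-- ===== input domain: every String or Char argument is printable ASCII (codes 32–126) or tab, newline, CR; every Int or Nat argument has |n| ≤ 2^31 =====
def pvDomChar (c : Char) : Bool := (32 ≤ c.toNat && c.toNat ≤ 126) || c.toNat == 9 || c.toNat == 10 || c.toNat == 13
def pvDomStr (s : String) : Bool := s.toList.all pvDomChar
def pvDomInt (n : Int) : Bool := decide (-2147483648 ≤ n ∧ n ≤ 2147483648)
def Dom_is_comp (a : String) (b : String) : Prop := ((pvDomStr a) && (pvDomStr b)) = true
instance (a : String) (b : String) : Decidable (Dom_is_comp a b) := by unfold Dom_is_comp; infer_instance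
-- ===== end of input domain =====

-- B replaces A's nested scans with a deletion set built once from a and one filtering pass over b (faster, asymptotic).


-- ===== PORT A =====
-- inner 'for j in range(len(a))' with its break and last-index append
def isCompInner (la : List Char) (c : Char) (temp : String) (j : Nat) : String :=
  if h : j < la.length then
    if c == la[j] then temp
    else
      isCompInner la c (if j == la.length - 1 then temp.push c else temp) (j + 1)
  else temp
termination_by la.length - j

def is_comp (a : String) (b : String) : String :=
  if a == "" then b
  else
    (List.range b.toList.length).foldl
      (fun temp i => isCompInner a.toList (b.toList.getD i ' ') temp 0) ""

-- ===== PORT B =====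
def is_comp_alt (a : String) (b : String) : String :=
  if a == "" then b
  else
    let table : PySem.Set Char := PySem.Set.ofList a.toList
    String.ofList (b.toList.filter (fun c => !(PySem.Set.contains table c)))

-- ===== PRECONDITION & SPEC =====
def Spec_is_comp (a : String) (b : String) (out : String) : Prop := out = is_comp_alt a b
instance (a : String) (b : String) (out : String) : Decidable (Spec_is_comp a b out) := by unfold Spec_is_comp; infer_instance

-- ===== CLAIM (what is proved, stated in full; the proofs are below) =====
def Claim_equal_is_comp : Prop := ∀ (a : String) (b : String), Dom_is_comp a b → Spec_is_comp a b (is_comp a b)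

-- ===== LEMMAS AND PROOFS =====

-- the inner scan appends c exactly when c occurs nowhere in la from index j on
lemma isCompInner_eq (la : List Char) (c : Char) :
    ∀ j temp, j < la.length →
      isCompInner la c temp j = if (la.drop j).contains c then temp else temp.push c := by
  intro j temp hj
  induction hlen : la.length - j generalizing j temp with
  | zero => omega
  | succ n ih =>
    rw [isCompInner]
    rw [dif_pos hj]
    have hdrop : la.drop j = la[j] :: la.drop (j + 1) := List.drop_eq_getElem_cons hj
    by_cases hc : c = la[j]
    · rw [if_pos (beq_iff_eq.mpr hc), hdrop, if_pos (by rw [List.contains_cons]; simp [hc])]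
    · have hbc : (c == la[j]) = false := beq_eq_false_iff_ne.mpr hc
      have hcont : (la.drop j).contains c = (la.drop (j + 1)).contains c := by
        rw [hdrop, List.contains_cons, hbc, Bool.false_or]
      rw [if_neg (by simp [hbc])]
      by_cases hlast : j = la.length - 1
      · have hj1 : ¬ j + 1 < la.length := by omega
        rw [isCompInner, dif_neg hj1]
        have hnil : la.drop (j + 1) = [] := List.drop_eq_nil_of_le (by omega)
        rw [if_pos (beq_iff_eq.mpr hlast), hcont, hnil]
        simp
      · have hj1 : j + 1 < la.length := by omega
        rw [if_neg (by simp [hlast]), ih (j + 1) temp hj1 (by omega), hcont]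

-- folding the inner scan over indices of lb is folding it over lb itself
lemma fold_index_eq (la : List Char) :
    ∀ (lb : List Char) (temp : String),
      (List.range lb.length).foldl (fun t i => isCompInner la (lb.getD i ' ') t 0) temp
        = lb.foldl (fun t c => isCompInner la c t 0) temp := by
  intro lb
  induction lb using List.reverseRecOn with
  | nil => intro temp; simp
  | append_singleton xs x ih =>
    intro temp
    rw [List.length_append, List.length_singleton, List.range_succ, List.foldl_append,
        List.foldl_append]
    have hcong : (List.range xs.length).foldl
        (fun t i => isCompInner la ((xs ++ [x]).getD i ' ') t 0) temp
        = (List.range xs.length).foldl (fun t i => isCompInner la (xs.getD i ' ') t 0) temp := by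
      apply PySem.List.foldl_congr_mem
      intro t i hi
      have : i < xs.length := List.mem_range.mp hi
      rw [List.getD_append _ _ _ _ this]
    rw [hcong, ih]
    simp

-- the per-character step, folded, filters lb (needs la ≠ [])
lemma fold_filter (la : List Char) (hla : la ≠ []) :
    ∀ (lb : List Char) (temp : String),
      lb.foldl (fun t c => isCompInner la c t 0) temp
        = temp ++ String.ofList (lb.filter (fun c => !(la.contains c))) := by
  intro lb
  induction lb with
  | nil => intro temp; simp
  | cons c cs ih =>
    intro temp
    have h0 : 0 < la.length := List.length_pos_of_ne_nil hla
    rw [List.foldl_cons, isCompInner_eq la c 0 temp h0, List.drop_zero]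
    by_cases hc : la.contains c
    · have hmem : c ∈ la := by simpa using hc
      rw [if_pos hc, ih, List.filter_cons]
      simp [hmem]
    · have hmem : c ∉ la := by simpa using hc
      have hpush : temp.push c = temp ++ String.ofList [c] := (String.append_left_inj temp).mp rfl
      have hfalse : la.contains c = false := by simpa using hmem
      rw [if_neg hc, ih, List.filter_cons, hpush, if_pos (by rw [hfalse]; rfl),
        String.append_assoc, ← String.ofList_append, List.singleton_append]

-- ===== VERDICT (by name: the statement is the Claim_ definition above) =====
theorem is_comp_spec : Claim_equal_is_comp := by
  intro a b _
  unfold Spec_is_comp is_comp is_comp_alt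
  by_cases ha : a = ""
  · simp [ha]
  · have hbe : (a == "") = false := beq_eq_false_iff_ne.mpr ha
    simp only [hbe, Bool.false_eq_true, if_neg, not_false_iff]
    have hla : a.toList ≠ [] := by
      intro h
      exact ha (by simpa using congrArg String.ofList h)
    rw [fold_index_eq, fold_filter a.toList hla]
    simp [PySem.Set.contains, PySem.Set.mem_ofList]
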